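-- pv_equiv track=rewrite | github.com/JiaweiHan88/paperclip-orchestrator | ai_tools_bridge/packages/ai_tools_github/src/ai_tools_github/utils/diff.py | filter_chunks_in_file_diff
-- ===== SOURCE A (Python) =====
-- def filter_chunks_in_file_diff(file_diff: str, max_lines: int) -> str:
--     """
--     Filter chunks within a single file diff, removing those that exceed max_lines.
--
--     Args:
--         file_diff: A single file's diff content
--         max_lines: Maximum number of lines allowed in a chunk
--
--     Returns:
--         Filtered file diff with large chunks removed
--     """
--     lines = file_diff.split("\n")
--
--     # Find the header (everything before the first @@ line)
--     header_lines: list[str] = []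
--     content_start_idx = 0
--
--     for i, line in enumerate(lines):
--         if line.startswith("@@"):
--             content_start_idx = i
--             break
--         header_lines.append(line)
--
--     # If no @@ found, return the original (probably not a proper diff)
--     if content_start_idx == 0:
--         return file_diff
--
--     # Split the content into chunks by @@ markers
--     chunks = split_diff_chunks(lines[content_start_idx:])
--
--     # Filter chunks by size
--     filtered_chunks: list[list[str]] = []
--     for chunk in chunks:
--         chunk_size = count_diff_lines(chunk)
--         if chunk_size <= max_lines:
--             filtered_chunks.append(chunk)
--
--     # Reconstruct the diff
--     if not filtered_chunks:
--         # If all chunks were too large, return just the header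
--         return "\n".join(header_lines)
--
--     result_lines: list[str] = header_lines + []
--     for chunk in filtered_chunks:
--         result_lines.extend(chunk)
--
--     return "\n".join(result_lines)
--
-- def split_diff_chunks(content_lines: list[str]) -> list[list[str]]:
--     """
--     Split diff content into chunks separated by @@ markers.
--
--     Args:
--         content_lines: Lines of diff content starting from the first @@
--
--     Returns:
--         List of chunks, where each chunk is a list of lines
--     """
--     chunks: list[list[str]] = []
--     current_chunk: list[str] = []
--
--     for line in content_lines:
--         if line.startswith("@@"):
--             # If we have a current chunk, save it
--             if current_chunk:
--                 chunks.append(current_chunk)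
--                 current_chunk = []
--         current_chunk.append(line)
--
--     # Don't forget the last chunk
--     if current_chunk:
--         chunks.append(current_chunk)
--
--     return chunks
--
-- def count_diff_lines(chunk: list[str]) -> int:
--     """
--     Count the number of actual diff lines (+ and - lines) in a chunk.
--
--     Args:
--         chunk: List of lines in a diff chunk
--
--     Returns:
--         Number of lines that represent actual changes
--     """
--     count = 0
--     for line in chunk:
--         # Skip the @@ header line and context lines that don't start with + or -
--         if line.startswith(("+", "-")) and not line.startswith(("+++", "---")):
--             count += 1
--     return count
-- ===== SOURCE B (Python) =====
-- def filter_chunks_in_file_diff(file_diff: str, max_lines: int) -> str: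
--     """Single-pass rewrite: stream the lines once, flushing each chunk as it
--     closes instead of materialising a chunk list and counting it separately."""
--     lines = file_diff.split("\n")
--     result = []
--     i = 0
--     while i < len(lines) and not lines[i].startswith("@@"):
--         result.append(lines[i])
--         i += 1
--     if i == 0 or i == len(lines):
--         # no header before the first @@, or no @@ at all: not a proper diff
--         return file_diff
--     chunk: list[str] = []
--     count = 0
--
--     def flush():
--         nonlocal chunk, count
--         if chunk and count <= max_lines:
--             result.extend(chunk)
--         chunk = []
--         count = 0
--
--     for line in lines[i:]:
--         if line.startswith("@@"):
--             flush()
--         chunk.append(line)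
--         if (line.startswith("+") or line.startswith("-")) and not (
--             line.startswith("+++") or line.startswith("---")
--         ):
--             count += 1
--     flush()
--     return "\n".join(result)
-- ===== Notes on version B (the rewrite author's own statement) =====
-- stated objective: simpler
-- what changed: B replaces A's three helper passes (materialise a list of chunks, count each chunk, filter, then re-concatenate) with a single streaming pass over the lines that keeps a running +/- count and flushes each chunk into the output as soon as it closes.
import Mathlib
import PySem

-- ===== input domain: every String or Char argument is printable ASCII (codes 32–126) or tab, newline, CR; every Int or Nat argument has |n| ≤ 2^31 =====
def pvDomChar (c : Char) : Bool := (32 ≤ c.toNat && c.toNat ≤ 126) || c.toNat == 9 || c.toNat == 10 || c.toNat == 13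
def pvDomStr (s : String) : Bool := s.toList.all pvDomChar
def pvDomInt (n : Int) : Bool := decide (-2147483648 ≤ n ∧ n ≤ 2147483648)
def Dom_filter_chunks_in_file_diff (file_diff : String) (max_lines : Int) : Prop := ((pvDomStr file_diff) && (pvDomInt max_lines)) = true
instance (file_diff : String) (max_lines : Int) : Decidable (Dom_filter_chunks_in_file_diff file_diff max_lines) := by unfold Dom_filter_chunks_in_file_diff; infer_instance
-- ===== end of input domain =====

-- B is a single streaming pass that flushes each chunk as it closes, instead of A's
-- chunk-list materialisation plus separate counting and filtering passes (objective: simpler).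

-- ===== PORT A =====
-- A's header loop: enumerate, break at the first '@@' line; content_start_idx stays 0 if no '@@'
def pvHeaderScan : List String → Int → List String × Int
  | [], _ => ([], 0)
  | l :: ls, i =>
    if PySem.Str.startswith l "@@" then ([], i)
    else
      let p := pvHeaderScan ls (i + 1)
      (l :: p.1, p.2)

def pvSplitStep (st : List (List String) × List String) (line : String) : List (List String) × List String :=
  let st1 :=
    if PySem.Str.startswith line "@@" then
      if st.2 ≠ [] then (st.1 ++ [st.2], ([] : List String)) else st
    else st
  (st1.1, st1.2 ++ [line])

def split_diff_chunks (content_lines : List String) : List (List String) :=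
  let st := content_lines.foldl pvSplitStep ([], [])
  if st.2 ≠ [] then st.1 ++ [st.2] else st.1

def pvIsDiffLine (line : String) : Bool :=
  (PySem.Str.startswith line "+" || PySem.Str.startswith line "-") &&
  !(PySem.Str.startswith line "+++" || PySem.Str.startswith line "---")

def count_diff_lines (chunk : List String) : Int :=
  chunk.foldl (fun c line => if pvIsDiffLine line then c + 1 else c) 0

def filter_chunks_in_file_diff (file_diff : String) (max_lines : Int) : String :=
  -- split? is none only for an empty separator, which "\n" is not: getD is a totality guard
  let lines := (PySem.Str.split? file_diff "\n").getD []
  let hs := pvHeaderScan lines 0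
  let header_lines := hs.1
  let content_start_idx := hs.2
  if content_start_idx = 0 then file_diff
  else
    let chunks := split_diff_chunks (PySem.List.slice lines (some content_start_idx) none)
    let filtered_chunks :=
      chunks.foldl (fun acc chunk => if count_diff_lines chunk ≤ max_lines then acc ++ [chunk] else acc) []
    if filtered_chunks = [] then PySem.Str.join "\n" header_lines
    else PySem.Str.join "\n" (filtered_chunks.foldl (fun acc chunk => acc ++ chunk) header_lines)

-- ===== PORT B =====
-- B's initial while loop, as a structural recursion returning (collected result, remaining lines);
-- i = (result).length, lines[i:] = rest; 'i == 0' ↔ result = [], 'i == len(lines)' ↔ rest = []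
def pvSplitHeader : List String → List String × List String
  | [] => ([], [])
  | l :: ls =>
    if PySem.Str.startswith l "@@" then ([], l :: ls)
    else
      let p := pvSplitHeader ls
      (l :: p.1, p.2)

-- B's flush(): the new result list (the call sites also reset chunk := [], count := 0)
def pvFlush (max_lines : Int) (res chunk : List String) (count : Int) : List String :=
  if chunk ≠ [] ∧ count ≤ max_lines then res ++ chunk else res

-- B's for-loop body
def pvBStep (max_lines : Int) (st : List String × List String × Int) (line : String) :
    List String × List String × Int :=
  let st1 := if PySem.Str.startswith line "@@"
             then (pvFlush max_lines st.1 st.2.1 st.2.2, ([] : List String), (0 : Int))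
             else st
  (st1.1, st1.2.1 ++ [line],
   if (PySem.Str.startswith line "+" || PySem.Str.startswith line "-") &&
      !(PySem.Str.startswith line "+++" || PySem.Str.startswith line "---")
   then st1.2.2 + 1 else st1.2.2)

def filter_chunks_in_file_diff_alt (file_diff : String) (max_lines : Int) : String :=
  let lines := (PySem.Str.split? file_diff "\n").getD []
  let p := pvSplitHeader lines
  if p.1 = [] ∨ p.2 = [] then file_diff
  else
    let st := p.2.foldl (pvBStep max_lines) (p.1, [], 0)
    PySem.Str.join "\n" (pvFlush max_lines st.1 st.2.1 st.2.2)

-- ===== PRECONDITION & SPEC =====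
def Spec_filter_chunks_in_file_diff (file_diff : String) (max_lines : Int) (out : String) : Prop := out = filter_chunks_in_file_diff_alt file_diff max_lines
instance (file_diff : String) (max_lines : Int) (out : String) : Decidable (Spec_filter_chunks_in_file_diff file_diff max_lines out) := by unfold Spec_filter_chunks_in_file_diff; infer_instance

-- ===== CLAIM (what is proved, stated in full; the proofs are below) =====
def Claim_equal_filter_chunks_in_file_diff : Prop := ∀ (file_diff : String) (max_lines : Int), Dom_filter_chunks_in_file_diff file_diff max_lines → Spec_filter_chunks_in_file_diff file_diff max_lines (filter_chunks_in_file_diff file_diff max_lines)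

-- ===== LEMMAS AND PROOFS =====

-- the two header scans agree: A's (header, idx) versus B's (header, rest)
theorem pvHeaderScan_eq (ls : List String) (n : Int) :
    pvHeaderScan ls n =
      (if (pvSplitHeader ls).2 = [] then (ls, 0)
       else ((pvSplitHeader ls).1, n + (pvSplitHeader ls).1.length)) := by
  induction ls generalizing n with
  | nil => simp [pvHeaderScan, pvSplitHeader]
  | cons l ls ih =>
    by_cases h : PySem.Chars.startswith l.toList ['@', '@'] = true
    · simp [pvHeaderScan, pvSplitHeader, h]
    · by_cases hr : (pvSplitHeader ls).2 = [] <;>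
        simp [pvHeaderScan, pvSplitHeader, h, hr, ih] <;> omega

theorem pvSplitHeader_append (ls : List String) :
    (pvSplitHeader ls).1 ++ (pvSplitHeader ls).2 = ls := by
  induction ls with
  | nil => simp [pvSplitHeader]
  | cons l ls ih =>
    by_cases h : PySem.Chars.startswith l.toList ['@', '@'] = true <;>
      simp [pvSplitHeader, h, ih]

-- A's split-chunks accumulator only grows at the front
theorem pvSplitStep_accum (ls : List String) (chunks : List (List String)) (cur : List String) :
    ls.foldl pvSplitStep (chunks, cur) =
      (chunks ++ (ls.foldl pvSplitStep ([], cur)).1, (ls.foldl pvSplitStep ([], cur)).2) := by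
  induction ls generalizing chunks cur with
  | nil => simp
  | cons l ls ih =>
    by_cases h : PySem.Chars.startswith l.toList ['@', '@'] = true
    · by_cases hc : cur = []
      · have e : pvSplitStep (chunks, cur) l = (chunks, [l]) := by simp [pvSplitStep, h, hc]
        have e0 : pvSplitStep (([] : List (List String)), cur) l = ([], [l]) := by
          simp [pvSplitStep, h, hc]
        rw [List.foldl_cons, List.foldl_cons, e, e0]
        exact ih chunks [l]
      · have e : pvSplitStep (chunks, cur) l = (chunks ++ [cur], [l]) := by
          simp [pvSplitStep, h, hc]
        have e0 : pvSplitStep (([] : List (List String)), cur) l = ([cur], [l]) := by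
          simp [pvSplitStep, h, hc]
        rw [List.foldl_cons, List.foldl_cons, e, e0, ih (chunks ++ [cur]) [l], ih [cur] [l]]
        simp
    · have e : ∀ cs : List (List String), pvSplitStep (cs, cur) l = (cs, cur ++ [l]) := by
        intro cs; simp [pvSplitStep, h]
      rw [List.foldl_cons, List.foldl_cons, e, e]
      exact ih chunks (cur ++ [l])

theorem count_snoc (cur : List String) (line : String) :
    count_diff_lines (cur ++ [line]) =
      if pvIsDiffLine line then count_diff_lines cur + 1 else count_diff_lines cur := by
  simp [count_diff_lines]

-- what a full A-side chunking from state cur over ls keeps, flattened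
def pvKept (max_lines : Int) (cur : List String) (ls : List String) : List String :=
  let st := ls.foldl pvSplitStep ([], cur)
  let chunks := if st.2 ≠ [] then st.1 ++ [st.2] else st.1
  (chunks.filter (fun c => decide (count_diff_lines c ≤ max_lines))).flatten

-- the core invariant: B's streaming fold equals A's chunk-filter-flatten
theorem pvB_fold_eq (max_lines : Int) (ls : List String) (res cur : List String) :
    pvFlush max_lines (ls.foldl (pvBStep max_lines) (res, cur, count_diff_lines cur)).1
      (ls.foldl (pvBStep max_lines) (res, cur, count_diff_lines cur)).2.1
      (ls.foldl (pvBStep max_lines) (res, cur, count_diff_lines cur)).2.2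
      = res ++ pvKept max_lines cur ls := by
  induction ls generalizing res cur with
  | nil =>
    simp only [List.foldl_nil, pvFlush, pvKept]
    by_cases hc : cur = []
    · simp [hc]
    · by_cases hm : count_diff_lines cur ≤ max_lines <;> simp [hc, hm]
  | cons l ls ih =>
    by_cases h : PySem.Chars.startswith l.toList ['@', '@'] = true
    · -- chunk boundary: B flushes, A closes the current chunk
      have hstep : pvBStep max_lines (res, cur, count_diff_lines cur) l =
          (pvFlush max_lines res cur (count_diff_lines cur), [l], count_diff_lines [l]) := by
        simp [pvBStep, h, count_diff_lines, pvIsDiffLine]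
      have hkept : pvKept max_lines cur (l :: ls) =
          (if cur ≠ [] ∧ count_diff_lines cur ≤ max_lines then cur else []) ++
            pvKept max_lines [l] ls := by
        simp only [pvKept, List.foldl_cons, pvSplitStep]
        by_cases hc : cur = []
        · simp [h, hc]
        · simp [h, hc]
          rw [pvSplitStep_accum ls [cur] [l]]
          by_cases hr : (ls.foldl pvSplitStep ([], [l])).2 = [] <;>
            by_cases hm : count_diff_lines cur ≤ max_lines <;>
            simp [hr, hm, List.filter_append, List.flatten_append]
      rw [List.foldl_cons, hstep, ih, hkept, pvFlush]
      by_cases hc : cur = [] <;> by_cases hm : count_diff_lines cur ≤ max_lines <;>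
        simp [hc, hm, List.append_assoc]
    · -- ordinary line: both sides extend the current chunk
      have hstep : pvBStep max_lines (res, cur, count_diff_lines cur) l =
          (res, cur ++ [l], count_diff_lines (cur ++ [l])) := by
        simp [pvBStep, h, count_snoc, pvIsDiffLine]
      have hkept : pvKept max_lines cur (l :: ls) = pvKept max_lines (cur ++ [l]) ls := by
        simp [pvKept, pvSplitStep, h]
      rw [List.foldl_cons, hstep, ih, hkept]

-- A's two result loops, expressed through filter/flatten
theorem pvA_result (max_lines : Int) (chunks : List (List String)) (header : List String) :
    (if chunks.foldl
        (fun acc chunk => if count_diff_lines chunk ≤ max_lines then acc ++ [chunk] else acc) [] = []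
     then PySem.Str.join "\n" header
     else PySem.Str.join "\n" ((chunks.foldl
        (fun acc chunk => if count_diff_lines chunk ≤ max_lines then acc ++ [chunk] else acc) []).foldl
          (fun acc chunk => acc ++ chunk) header)) =
    PySem.Str.join "\n"
      (header ++ (chunks.filter (fun c => decide (count_diff_lines c ≤ max_lines))).flatten) := by
  have hf : chunks.foldl
      (fun acc chunk => if count_diff_lines chunk ≤ max_lines then acc ++ [chunk] else acc) []
      = chunks.filter (fun c => decide (count_diff_lines c ≤ max_lines)) := by
    induction chunks using List.reverseRecOn with
    | nil => simp
    | append_singleton cs c ih =>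
      by_cases hm : count_diff_lines c ≤ max_lines <;>
        simp [List.filter_append, hm, ih]
  have he : ∀ (fl : List (List String)) (acc : List String),
      fl.foldl (fun acc chunk => acc ++ chunk) acc = acc ++ fl.flatten := by
    intro fl
    induction fl with
    | nil => simp
    | cons c cs ih => intro acc; simp [ih, List.append_assoc]
  rw [hf]
  by_cases h0 : chunks.filter (fun c => decide (count_diff_lines c ≤ max_lines)) = [] <;>
    simp [h0, he]

-- ===== VERDICT (by name: the statement is the Claim_ definition above) =====
theorem filter_chunks_in_file_diff_spec : Claim_equal_filter_chunks_in_file_diff := by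
  intro file_diff max_lines _
  unfold Spec_filter_chunks_in_file_diff
  simp only [filter_chunks_in_file_diff, filter_chunks_in_file_diff_alt]
  set lines := (PySem.Str.split? file_diff "\n").getD [] with hlines
  have hsh := pvHeaderScan_eq lines 0
  by_cases h2 : (pvSplitHeader lines).2 = []
  · rw [hsh]; simp [h2]
  · by_cases h1 : (pvSplitHeader lines).1 = []
    · rw [hsh]; simp [h2, h1]
    · have hidx : (pvHeaderScan lines 0).2 = ((pvSplitHeader lines).1.length : Int) := by
        rw [hsh]; simp [h2]
      have hhd : (pvHeaderScan lines 0).1 = (pvSplitHeader lines).1 := by rw [hsh]; simp [h2]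
      have hne : ¬ (pvHeaderScan lines 0).2 = 0 := by
        rw [hidx]; simpa using h1
      rw [if_neg hne]
      rw [if_neg (show ¬((pvSplitHeader lines).1 = [] ∨ (pvSplitHeader lines).2 = []) from by
        simp [h1, h2])]
      have hdrop : PySem.List.slice lines (some (pvHeaderScan lines 0).2) none =
          (pvSplitHeader lines).2 := by
        have hsplit := pvSplitHeader_append lines
        rw [hidx, PySem.List.slice_from_natCast]
        nth_rewrite 2 [← hsplit]
        exact List.drop_left
      rw [hdrop, hhd]
      have hb := pvB_fold_eq max_lines (pvSplitHeader lines).2 (pvSplitHeader lines).1 []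
      rw [show count_diff_lines ([] : List String) = 0 from rfl] at hb
      rw [hb, pvA_result]
      congr 1
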